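-- pv_equiv track=rewrite | github.com/huo-jian/mantistable | test_method/for_server/CEA_CPA.py | predicate_phase2
-- ===== SOURCE A (Python) =====
-- import collections
--
-- def predicate_phase2(table_model, subjcol):
--     predicates = {}
--     for row in table_model:
--         for col_idx in row.keys():
--             if subjcol == col_idx:
--                 continue
--             else:
--                 triples = row[col_idx]
--                 for triple in triples:
--                     if col_idx not in predicates.keys():
--                         predicates[col_idx] = []
--
--                     if triple[1].startswith("http://dbpedia.org/ontology/"):
--                         predicates[col_idx].append(triple[1])
--
--     winning_predicates = {}
--     for col_idx in predicates.keys():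
--         column_freq = dict(collections.Counter(predicates[col_idx]))
--
--         if len(column_freq) > 0:
--             winning_predicates[col_idx] = max(column_freq, key=lambda k: column_freq[k])
--
--     return winning_predicates
-- ===== SOURCE B (Python) =====
-- import collections
--
-- def predicate_phase2(table_model, subjcol):
--     # Flat pair-counting: one global Counter over (column, predicate) pairs,
--     # a linear strict-max scan to pick each column's winner, and a separate
--     # key-order list; no per-column occurrence lists are ever built.
--     PFX = "http://dbpedia.org/ontology/"
--     col_order = dict.fromkeys(
--         col for row in table_model for col, triples in row.items()
--         if col != subjcol and triples)
--     pair_counts = collections.Counter(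
--         (col, t[1]) for row in table_model for col, triples in row.items()
--         if col != subjcol for t in triples if t[1].startswith(PFX))
--     best = {}
--     for (col, pred), c in pair_counts.items():
--         if c > best.get(col, (0, None))[0]:
--             best[col] = (c, pred)
--     return {col: best[col][1] for col in col_order if col in best}
-- ===== Notes on version B (the rewrite author's own statement) =====
-- stated objective: alternative
-- what changed: A builds per-column lists of matching predicate URIs in a nested scan and then, per column, builds a Counter and takes its max; B never groups by column: it flattens the table into one global Counter over (column, predicate) pairs, picks each column's winner by a single linear strict-max scan over that counter's items, and restores the output key order from a separately computed first-appearance list of columns.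
import Mathlib
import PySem

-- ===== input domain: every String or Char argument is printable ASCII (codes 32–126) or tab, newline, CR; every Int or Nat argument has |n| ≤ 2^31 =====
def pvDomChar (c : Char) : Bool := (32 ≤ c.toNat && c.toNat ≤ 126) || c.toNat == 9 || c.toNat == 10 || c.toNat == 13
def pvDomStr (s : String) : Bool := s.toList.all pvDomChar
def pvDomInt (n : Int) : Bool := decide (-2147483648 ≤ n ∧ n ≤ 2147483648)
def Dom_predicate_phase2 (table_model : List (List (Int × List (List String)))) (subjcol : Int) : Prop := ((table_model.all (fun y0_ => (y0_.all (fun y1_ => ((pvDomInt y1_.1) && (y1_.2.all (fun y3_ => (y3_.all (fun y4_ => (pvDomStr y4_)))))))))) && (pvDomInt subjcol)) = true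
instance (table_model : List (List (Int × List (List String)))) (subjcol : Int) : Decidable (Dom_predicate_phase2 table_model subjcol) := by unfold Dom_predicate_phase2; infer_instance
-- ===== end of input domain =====

-- B replaces A's per-column grouping (build a list of matching predicate URIs per column, then a
-- Counter and a max per column) by a flat scheme: one global Counter over (column, predicate)
-- pairs, a linear strict-max scan over its items to pick each column's winner, and a separate
-- first-appearance list of columns for the output key order; objective: alternative.
-- Rows are Python dicts, modelled as association lists; equivalence is about the return value.

-- ===== PORT A =====
def predicate_phase2 (table_model : List (List (Int × List (List String)))) (subjcol : Int) : List (Int × String) :=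
  let predicates : PySem.Dict Int (List String) :=
    table_model.foldl (fun preds row =>
      row.foldl (fun preds kv =>
        if subjcol == kv.1 then preds
        else
          kv.2.foldl (fun preds triple =>
            -- 'if col_idx not in predicates.keys(): predicates[col_idx] = []'
            let preds := if preds.contains kv.1 then preds else preds.insert kv.1 []
            match PySem.List.pyGet? triple 1 with   -- triple[1]; none = IndexError, excluded by Pre_
            | some p =>
                if PySem.Str.startswith p "http://dbpedia.org/ontology/" then
                  preds.modify kv.1 [] (fun l => l ++ [p])   -- predicates[col_idx].append(triple[1])
                else preds
            | none => preds) preds) preds)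
      PySem.Dict.empty
  let winning : PySem.Dict Int String :=
    predicates.items.foldl (fun win kv =>
      let freq : PySem.Dict String Int := PySem.Dict.counter kv.2   -- dict(collections.Counter(...))
      if 0 < freq.size then
        match PySem.List.max? freq.keys (fun k => freq.getD k 0) with   -- max(column_freq, key=...)
        | some m => win.insert kv.1 m
        | none => win   -- unreachable: guarded by 0 < freq.size
      else win) PySem.Dict.empty
  winning.items

-- ===== PORT B =====
def predicate_phase2_alt (table_model : List (List (Int × List (List String)))) (subjcol : Int) : List (Int × String) :=
  -- col_order = dict.fromkeys(col for row ... if col != subjcol and triples)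
  let colOrder : List Int :=
    PySem.List.dedup (table_model.flatMap (fun row =>
      (row.filter (fun kv => !(kv.1 == subjcol) && !kv.2.isEmpty)).map (·.1)))
  -- pair_counts = Counter((col, t[1]) for ... if col != subjcol for t in triples if t[1].startswith(PFX))
  let pairCounts : PySem.Dict (Int × String) Int :=
    PySem.Dict.counter (table_model.flatMap (fun row =>
      row.flatMap (fun kv =>
        if kv.1 == subjcol then []
        else kv.2.filterMap (fun t =>
          match PySem.List.pyGet? t 1 with   -- t[1]; none = IndexError, excluded by Pre_
          | some p =>
              if PySem.Str.startswith p "http://dbpedia.org/ontology/" then some (kv.1, p) else none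
          | none => none))))
  -- strict-max scan; the default's second component stands for Python's None and is never read
  let best : PySem.Dict Int (Int × String) :=
    pairCounts.items.foldl (fun best q =>
      if (best.getD q.1.1 (0, "")).1 < q.2 then best.insert q.1.1 (q.2, q.1.2) else best)
      PySem.Dict.empty
  -- {col: best[col][1] for col in col_order if col in best}
  (colOrder.foldl (fun out col =>
      match best.get? col with
      | some cp => out.insert col cp.2
      | none => out) (PySem.Dict.empty : PySem.Dict Int String)).items

-- ===== PRECONDITION & SPEC =====
-- Pre_ excludes (i) rows with duplicate column keys — a Python dict cannot represent them, so the
-- association-list model would diverge from dict semantics — and (ii) triples of length < 2 in a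
-- non-subject column, on which both A and B raise IndexError at triple[1].
def Pre_predicate_phase2 (table_model : List (List (Int × List (List String)))) (subjcol : Int) : Prop :=
  ∀ row ∈ table_model, (row.map Prod.fst).Nodup ∧
    ∀ kv ∈ row, kv.1 ≠ subjcol → ∀ t ∈ kv.2, 2 ≤ t.length
instance (table_model : List (List (Int × List (List String)))) (subjcol : Int) : Decidable (Pre_predicate_phase2 table_model subjcol) := by unfold Pre_predicate_phase2; infer_instance

def pvWitness_predicate_phase2 : (List (List (Int × List (List String)))) × Int :=
  ([[(0, [["s", "http://dbpedia.org/ontology/p", "o"]])]], 1)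

def Spec_predicate_phase2 (table_model : List (List (Int × List (List String)))) (subjcol : Int) (out : List (Int × String)) : Prop := out = predicate_phase2_alt table_model subjcol
instance (table_model : List (List (Int × List (List String)))) (subjcol : Int) (out : List (Int × String)) : Decidable (Spec_predicate_phase2 table_model subjcol out) := by unfold Spec_predicate_phase2; infer_instance

-- ===== CLAIM (what is proved, stated in full; the proofs are below) =====
def Claim_equal_predicate_phase2 : Prop := ∀ (table_model : List (List (Int × List (List String)))) (subjcol : Int), Dom_predicate_phase2 table_model subjcol → Pre_predicate_phase2 table_model subjcol → Spec_predicate_phase2 table_model subjcol (predicate_phase2 table_model subjcol)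

-- ===== LEMMAS AND PROOFS =====

-- the per-(column, triple) events A's nested scan visits, flattened
def pvEvents (tm : List (List (Int × List (List String)))) (sc : Int) : List (Int × List String) :=
  tm.flatMap (fun row => row.flatMap (fun kv =>
    if sc == kv.1 then [] else kv.2.map (fun t => (kv.1, t))))

-- A's per-triple step, as a function of one event
def pvStepA (preds : PySem.Dict Int (List String)) (e : Int × List String) :
    PySem.Dict Int (List String) :=
  let preds := if preds.contains e.1 then preds else preds.insert e.1 []
  match PySem.List.pyGet? e.2 1 with
  | some p =>
      if PySem.Str.startswith p "http://dbpedia.org/ontology/" then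
        preds.modify e.1 [] (fun l => l ++ [p])
      else preds
  | none => preds

-- the matching (column, predicate) pair an event contributes, if any
def pvPf (e : Int × List String) : Option (Int × String) :=
  match PySem.List.pyGet? e.2 1 with
  | some p =>
      if PySem.Str.startswith p "http://dbpedia.org/ontology/" then some (e.1, p) else none
  | none => none

def pvPairs (tm : List (List (Int × List (List String)))) (sc : Int) : List (Int × String) :=
  (pvEvents tm sc).filterMap pvPf

def pvOcc (tm : List (List (Int × List (List String)))) (sc : Int) (c : Int) : List String :=
  ((pvPairs tm sc).filter (fun q => q.1 == c)).map (·.2)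

-- the winner of column c (none = no matching predicate in c)
def pvG (tm : List (List (Int × List (List String)))) (sc : Int) (c : Int) : Option String :=
  PySem.List.max? (PySem.Set.ofList (pvOcc tm sc c)) (fun p => ((pvOcc tm sc c).count p : Int))

-- B's strict-max scan step
def pvStepB (best : PySem.Dict Int (Int × String)) (q : (Int × String) × Int) :
    PySem.Dict Int (Int × String) :=
  if (best.getD q.1.1 (0, "")).1 < q.2 then best.insert q.1.1 (q.2, q.1.2) else best

lemma pv_foldA_flatten (tm : List (List (Int × List (List String)))) (sc : Int)
    (d : PySem.Dict Int (List String)) :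
    tm.foldl (fun preds row =>
      row.foldl (fun preds kv =>
        if sc == kv.1 then preds
        else
          kv.2.foldl (fun preds triple =>
            let preds := if preds.contains kv.1 then preds else preds.insert kv.1 []
            match PySem.List.pyGet? triple 1 with
            | some p =>
                if PySem.Str.startswith p "http://dbpedia.org/ontology/" then
                  preds.modify kv.1 [] (fun l => l ++ [p])
                else preds
            | none => preds) preds) preds) d
    = (pvEvents tm sc).foldl pvStepA d := by
  simp only [pvEvents, List.foldl_flatMap]
  apply PySem.List.foldl_congr_mem
  intro acc row _
  apply PySem.List.foldl_congr_mem
  intro acc2 kv _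
  cases hc : sc == kv.1
  · simp only [Bool.false_eq_true, if_false]
    rw [List.foldl_map]
    apply PySem.List.foldl_congr_mem
    intro a t _
    rfl
  · simp

lemma pv_stepA_keys (d : PySem.Dict Int (List String)) (e : Int × List String) :
    (pvStepA d e).keys = PySem.Set.add d.keys e.1 := by
  unfold pvStepA
  by_cases hc : d.contains e.1 = true
  · have hmem : e.1 ∈ d.keys := (PySem.Dict.contains_iff_mem_keys _ _).mp hc
    have hadd : PySem.Set.add d.keys e.1 = d.keys := by
      simp [PySem.Set.add, PySem.Set.contains, hmem]
    simp only [hc, if_true, hadd]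
    cases hg : PySem.List.pyGet? e.2 1
    · rfl
    · show (if PySem.Str.startswith _ "http://dbpedia.org/ontology/" = true then
          (d.modify e.1 [] fun l => l ++ [_]) else d).keys = d.keys
      split
      · rw [PySem.Dict.keys_modify, PySem.Dict.keys_insert_of_contains _ _ hc]
      · rfl
  · have hc' : d.contains e.1 = false := Bool.eq_false_iff.mpr hc
    have hnm : e.1 ∉ d.keys := by
      rw [← PySem.Dict.contains_iff_mem_keys]; simp [hc']
    have hadd : PySem.Set.add d.keys e.1 = d.keys ++ [e.1] := by
      simp [PySem.Set.add, PySem.Set.contains, hnm]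
    have hk1 : (d.insert e.1 ([] : List String)).keys = d.keys ++ [e.1] :=
      PySem.Dict.keys_insert_of_not_contains d _ hc'
    have hc2 : (d.insert e.1 ([] : List String)).contains e.1 = true :=
      PySem.Dict.contains_insert_self d e.1 []
    simp only [hc', Bool.false_eq_true, if_false, hadd]
    cases hg : PySem.List.pyGet? e.2 1
    · exact hk1
    · show (if PySem.Str.startswith _ "http://dbpedia.org/ontology/" = true then
          ((d.insert e.1 []).modify e.1 [] fun l => l ++ [_]) else d.insert e.1 []).keys
          = d.keys ++ [e.1]
      split
      · rw [PySem.Dict.keys_modify, PySem.Dict.keys_insert_of_contains _ _ hc2, hk1]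
      · exact hk1

lemma pv_stepA_getD (d : PySem.Dict Int (List String)) (e : Int × List String) (c : Int) :
    (pvStepA d e).getD c [] =
      d.getD c [] ++ (match pvPf e with
        | some q => if q.1 == c then [q.2] else []
        | none => []) := by
  unfold pvStepA pvPf
  have hens : ∀ x : Int, (if d.contains e.1 = true then d else d.insert e.1 []).getD x [] = d.getD x [] := by
    intro x
    by_cases hc : d.contains e.1 = true
    · simp [hc]
    · have hc' : d.contains e.1 = false := Bool.eq_false_iff.mpr hc
      rw [if_neg hc, PySem.Dict.getD_insert]
      split
      · next h => rw [h, PySem.Dict.getD_of_not_contains d _ hc']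
      · rfl
  cases hg : PySem.List.pyGet? e.2 1 with
  | none => simp [hens]
  | some p =>
    simp only []
    split
    · next hs =>
      rw [PySem.Dict.getD_modify]
      by_cases hec : c = e.1
      · subst hec
        simp [hens]
      · have hne : ¬ (e.1 = c) := fun h => hec h.symm
        rw [if_neg hec, hens]
        simp [hne]
    · next hs => simp [hens]


lemma pv_foldA_keys (es : List (Int × List String)) (d : PySem.Dict Int (List String)) :
    (es.foldl pvStepA d).keys = PySem.Set.update d.keys (es.map (·.1)) := by
  induction es generalizing d with
  | nil => rfl
  | cons e es ih =>
    simp only [List.foldl_cons, List.map_cons]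
    rw [ih, pv_stepA_keys]
    rfl

lemma pv_foldA_getD (es : List (Int × List String)) (d : PySem.Dict Int (List String)) (c : Int) :
    (es.foldl pvStepA d).getD c [] =
      d.getD c [] ++ ((es.filterMap pvPf).filter (fun q => q.1 == c)).map (·.2) := by
  induction es generalizing d with
  | nil => simp
  | cons e es ih =>
    simp only [List.foldl_cons, List.filterMap_cons]
    rw [ih, pv_stepA_getD]
    cases hp : pvPf e with
    | none => simp
    | some q =>
      by_cases hqc : q.1 = c
      · simp [hqc]
      · simp [hqc]

lemma pv_count_pair (c : Int) (p : String) (l : List (Int × String)) :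
    l.count (c, p) = ((l.filter (fun q => q.1 == c)).map (·.2)).count p := by
  rw [List.count_eq_countP, List.count_eq_countP, List.countP_map, List.countP_filter]
  apply List.countP_congr
  intro q _
  simp only [Function.comp_apply, Bool.and_eq_true, beq_iff_eq, Prod.ext_iff]
  constructor
  · rintro ⟨h1, h2⟩; exact ⟨h2, h1⟩
  · rintro ⟨h1, h2⟩; exact ⟨h2, h1⟩

lemma pv_map_add (c : Int) (t : PySem.Set String) (p : String) :
    PySem.Set.add (t.map (fun x => (c, x))) (c, p) = (PySem.Set.add t p).map (fun x => (c, x)) := by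
  have hcc : (t.map (fun x => (c, x))).contains (c, p) = t.contains p := by
    apply Bool.eq_iff_iff.mpr
    simp only [PySem.Set.contains, List.contains_iff_mem, List.mem_map, Prod.mk.injEq]
    constructor
    · rintro ⟨x, hx, -, rfl⟩; exact hx
    · intro h; exact ⟨p, h, trivial, rfl⟩
  show (if (t.map (fun x => (c, x))).contains (c, p) = true then t.map (fun x => (c, x))
        else t.map (fun x => (c, x)) ++ [(c, p)])
      = (if t.contains p = true then t else t ++ [p]).map (fun x => (c, x))
  rw [hcc]
  cases h : t.contains p <;> simp

lemma pv_ofList_const_fst (c : Int) (l : List (Int × String)) (t : PySem.Set String)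
    (hl : ∀ q ∈ l, q.1 = c) :
    PySem.Set.update (t.map (fun p => (c, p))) l =
      (PySem.Set.update t (l.map (·.2))).map (fun p => (c, p)) := by
  induction l generalizing t with
  | nil => rfl
  | cons q l ih =>
    have hq : q = (c, q.2) := by
      have := hl q (List.mem_cons_self)
      exact Prod.ext this rfl
    have h1 : PySem.Set.update (t.map (fun p => (c, p))) (q :: l)
        = PySem.Set.update (PySem.Set.add (t.map (fun p => (c, p))) q) l := rfl
    rw [h1]
    rw [show PySem.Set.add (t.map (fun p => (c, p))) q
          = PySem.Set.add (t.map (fun p => (c, p))) (c, q.2) from by rw [← hq],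
        pv_map_add]
    exact ih _ (fun q hqmem => hl q (List.mem_cons_of_mem _ hqmem))

lemma pv_pairs_eq (tm : List (List (Int × List (List String)))) (sc : Int) :
    tm.flatMap (fun row =>
      row.flatMap (fun kv =>
        if kv.1 == sc then []
        else kv.2.filterMap (fun t =>
          match PySem.List.pyGet? t 1 with
          | some p =>
              if PySem.Str.startswith p "http://dbpedia.org/ontology/" then some (kv.1, p) else none
          | none => none)))
    = pvPairs tm sc := by
  simp only [pvPairs, pvEvents, List.filterMap_flatMap]
  apply List.flatMap_congr
  intro row _
  apply List.flatMap_congr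
  intro kv _
  cases hc : kv.1 == sc
  · simp only [beq_eq_false_iff_ne, ne_eq] at hc
    have hc2 : (sc == kv.1) = false := by
      simp only [beq_eq_false_iff_ne, ne_eq]
      exact fun h => hc h.symm
    simp only [Bool.false_eq_true, if_false, hc2]
    rw [List.filterMap_map]
    rfl
  · simp only [beq_iff_eq] at hc
    have hc2 : (sc == kv.1) = true := by simp [hc]
    simp [hc2]

lemma pv_add_idem {α : Type} [BEq α] [LawfulBEq α] (s : PySem.Set α) (k : α) :
    PySem.Set.add (PySem.Set.add s k) k = PySem.Set.add s k := by
  have h2 : (PySem.Set.add s k).contains k = true := by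
    simp only [PySem.Set.contains, List.contains_iff_mem]
    exact (PySem.Set.mem_add s k k).mpr (Or.inr rfl)
  show (if (PySem.Set.add s k).contains k = true then PySem.Set.add s k
        else PySem.Set.add s k ++ [k]) = PySem.Set.add s k
  rw [if_pos h2]

lemma pv_update_const {α : Type} [BEq α] [LawfulBEq α] (s : PySem.Set α) (k : α)
    (l : List (List String)) :
    PySem.Set.update s (l.map (fun _ => k)) = if l.isEmpty then s else PySem.Set.add s k := by
  induction l generalizing s with
  | nil => rfl
  | cons x xs ih =>
    have h1 : PySem.Set.update s ((x :: xs).map (fun _ => k))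
        = PySem.Set.update (PySem.Set.add s k) (xs.map (fun _ => k)) := rfl
    rw [h1, ih]
    cases h : xs.isEmpty <;> simp [pv_add_idem]

lemma pv_filter_add {α : Type} [BEq α] [LawfulBEq α] (p : α → Bool) (s : PySem.Set α) (x : α) :
    (PySem.Set.add s x).filter p =
      if p x then PySem.Set.add (s.filter p) x else s.filter p := by
  by_cases hc : s.contains x = true
  · have hm : x ∈ s := by simpa only [PySem.Set.contains, List.contains_iff_mem] using hc
    have he : (PySem.Set.add s x).filter p = s.filter p := by
      show (if s.contains x = true then s else s ++ [x]).filter p = s.filter p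
      rw [if_pos hc]
    rw [he]
    cases hp : p x
    · simp
    · have hm2 : (s.filter p).contains x = true := by
        simp only [PySem.Set.contains, List.contains_iff_mem]
        exact List.mem_filter.mpr ⟨hm, hp⟩
      show s.filter p = if true = true then
        (if (s.filter p).contains x = true then s.filter p else s.filter p ++ [x]) else s.filter p
      rw [if_pos rfl, if_pos hm2]
  · have hc' : s.contains x = false := Bool.eq_false_iff.mpr hc
    have hm : x ∉ s := by
      simp only [PySem.Set.contains, List.contains_iff_mem] at hc
      exact hc
    have he : (PySem.Set.add s x).filter p = s.filter p ++ List.filter p [x] := by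
      show (if s.contains x = true then s else s ++ [x]).filter p = _
      rw [if_neg hc]
      exact List.filter_append _ _
    rw [he]
    cases hp : p x
    · simp only [hp, Bool.false_eq_true, if_false]
      simp [hp]
    · have hm2 : (s.filter p).contains x = false := by
        rw [← Bool.not_eq_true, List.contains_iff_mem]
        intro h
        exact hm (List.mem_filter.mp h).1
      show s.filter p ++ List.filter p [x] = if true = true then
        (if (s.filter p).contains x = true then s.filter p else s.filter p ++ [x]) else s.filter p
      rw [if_pos rfl, if_neg (by rw [hm2]; exact Bool.false_ne_true)]
      simp [hp]

lemma pv_filter_update {α : Type} [BEq α] [LawfulBEq α] (p : α → Bool) (l : List α)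
    (s : PySem.Set α) :
    (PySem.Set.update s l).filter p = PySem.Set.update (s.filter p) (l.filter p) := by
  induction l generalizing s with
  | nil => rfl
  | cons x xs ih =>
    have h1 : PySem.Set.update s (x :: xs) = PySem.Set.update (PySem.Set.add s x) xs := rfl
    rw [h1, ih, pv_filter_add]
    cases hp : p x
    · simp [List.filter_cons, hp]
    · simp only [List.filter_cons, hp, if_pos rfl]
      rfl

lemma pv_update_append {α : Type} [BEq α] (s : PySem.Set α) (l1 l2 : List α) :
    PySem.Set.update s (l1 ++ l2) = PySem.Set.update (PySem.Set.update s l1) l2 :=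
  List.foldl_append

lemma pv_row_cols (sc : Int) (row : List (Int × List (List String))) (s : PySem.Set Int) :
    PySem.Set.update s (row.flatMap (fun kv =>
        ((if sc == kv.1 then [] else kv.2.map (fun t => (kv.1, t))).map (·.1))))
      = PySem.Set.update s ((row.filter (fun kv => !(kv.1 == sc) && !kv.2.isEmpty)).map (·.1)) := by
  induction row generalizing s with
  | nil => rfl
  | cons kv rest ih =>
    rw [List.flatMap_cons, pv_update_append, ih, List.filter_cons]
    cases hc : kv.1 == sc
    · have hc2 : (sc == kv.1) = false := by
        simp only [beq_eq_false_iff_ne, ne_eq] at hc ⊢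
        exact fun h => hc h.symm
      simp only [hc2, Bool.false_eq_true, if_false, List.map_map]
      rw [show ((·.1) ∘ fun t => ((kv.1, t) : Int × List String)) = (fun _ => kv.1) from rfl]
      rw [pv_update_const]
      cases he : kv.2.isEmpty
      · simp only [he, Bool.false_eq_true, if_false, hc, Bool.not_false, Bool.and_self, if_true]
        rfl
      · simp [he, hc]
    · have hc2 : (sc == kv.1) = true := by
        simp only [beq_iff_eq] at hc ⊢; exact hc.symm
      simp [hc2]

lemma pv_colOrder_eq (tm : List (List (Int × List (List String)))) (sc : Int) :
    PySem.Set.ofList ((pvEvents tm sc).map (·.1)) =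
      PySem.List.dedup (tm.flatMap (fun row =>
        (row.filter (fun kv => !(kv.1 == sc) && !kv.2.isEmpty)).map (·.1))) := by
  show PySem.Set.ofList _ = PySem.Set.ofList _
  rw [PySem.Set.ofList_eq_foldl, PySem.Set.ofList_eq_foldl]
  show PySem.Set.update [] _ = PySem.Set.update [] _
  simp only [pvEvents, List.map_flatMap]
  generalize ([] : PySem.Set Int) = s
  induction tm generalizing s with
  | nil => rfl
  | cons row rest ih =>
    rw [List.flatMap_cons, List.flatMap_cons, pv_update_append, pv_update_append, ih]
    congr 1
    exact pv_row_cols sc row s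

lemma pv_stepB_local (c : Int) (qs : List ((Int × String) × Int))
    (d d' : PySem.Dict Int (Int × String)) (h : d.get? c = d'.get? c) :
    (qs.foldl pvStepB d).get? c = ((qs.filter (fun x => x.1.1 == c)).foldl pvStepB d').get? c := by
  induction qs generalizing d d' with
  | nil => simpa using h
  | cons q qs ih =>
    rw [List.foldl_cons, List.filter_cons]
    cases hq : q.1.1 == c
    · simp only [Bool.false_eq_true, if_false]
      apply ih
      have hne : q.1.1 ≠ c := by simpa using hq
      unfold pvStepB
      split
      · rw [PySem.Dict.get?_insert_of_ne _ _ (fun hh => hne hh.symm), h]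
      · exact h
    · have heq : q.1.1 = c := by simpa using hq
      simp only [if_pos rfl, List.foldl_cons]
      apply ih
      unfold pvStepB
      rw [heq, PySem.Dict.getD_eq_get?_getD, PySem.Dict.getD_eq_get?_getD, h]
      split
      · rw [PySem.Dict.get?_insert_self, PySem.Dict.get?_insert_self]
      · exact h

lemma pv_run_max (c : Int) (key : String → Int) (ts : List String)
    (st : PySem.Dict Int (Int × String)) (acc : Option String)
    (hst : st.get? c = acc.map (fun m => (key m, m))) (hpos : ∀ p ∈ ts, 0 < key p) :
    (ts.foldl (fun st p =>
        if (st.getD c (0, "")).1 < key p then st.insert c (key p, p) else st) st).get? c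
      = (ts.foldl (fun acc x =>
          match acc with
          | none => some x
          | some m => if key m < key x then some x else some m) acc).map (fun m => (key m, m)) := by
  induction ts generalizing st acc with
  | nil => simpa using hst
  | cons p ts ih =>
    rw [List.foldl_cons, List.foldl_cons]
    apply ih
    · cases acc with
      | none =>
        simp only [Option.map_none] at hst
        rw [PySem.Dict.getD_eq_get?_getD, hst]
        have : (0 : Int) < key p := hpos p List.mem_cons_self
        simp only [Option.getD_none]
        rw [if_pos this]
        simp [PySem.Dict.get?_insert_self]
      | some m =>
        simp only [Option.map_some] at hst
        rw [PySem.Dict.getD_eq_get?_getD, hst]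
        simp only [Option.getD_some]
        by_cases hlt : key m < key p
        · rw [if_pos hlt, if_pos hlt]
          simp [PySem.Dict.get?_insert_self]
        · rw [if_neg hlt, if_neg hlt, hst]
          simp
    · exact fun x hx => hpos x (List.mem_cons_of_mem _ hx)

lemma pv_best_get (tm : List (List (Int × List (List String)))) (sc : Int) (c : Int) :
    ((PySem.Dict.counter (pvPairs tm sc)).items.foldl pvStepB PySem.Dict.empty).get? c
      = (pvG tm sc c).map (fun m => (((pvOcc tm sc c).count m : Int), m)) := by
  rw [PySem.Dict.items_counter]
  rw [pv_stepB_local c _ _ PySem.Dict.empty rfl]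
  rw [List.filter_map]
  rw [show ((fun x : (Int × String) × Int => x.1.1 == c) ∘
        (fun k : Int × String => (k, ((pvPairs tm sc).count k : Int))))
      = (fun q : Int × String => q.1 == c) from rfl]
  have hof : (PySem.Set.ofList (pvPairs tm sc)).filter (fun q => q.1 == c)
      = PySem.Set.ofList ((pvPairs tm sc).filter (fun q => q.1 == c)) := by
    rw [PySem.Set.ofList_eq_foldl, PySem.Set.ofList_eq_foldl]
    exact pv_filter_update _ _ []
  rw [hof]
  have hconst : PySem.Set.ofList ((pvPairs tm sc).filter (fun q => q.1 == c))
      = (PySem.Set.ofList (pvOcc tm sc c)).map (fun p => (c, p)) := by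
    rw [PySem.Set.ofList_eq_foldl, PySem.Set.ofList_eq_foldl]
    have := pv_ofList_const_fst c ((pvPairs tm sc).filter (fun q => q.1 == c)) []
      (fun q hq => by simpa using (List.mem_filter.mp hq).2)
    simpa [pvOcc] using this
  rw [hconst, List.map_map, List.foldl_map]
  have hcong : ∀ (st : PySem.Dict Int (Int × String)) (p : String),
      pvStepB st (((fun k : Int × String => (k, ((pvPairs tm sc).count k : Int))) ∘
          (fun p => (c, p))) p)
      = (if (st.getD c (0, "")).1 < ((pvOcc tm sc c).count p : Int)
          then st.insert c (((pvOcc tm sc c).count p : Int), p) else st) := by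
    intro st p
    show (if (st.getD c (0, "")).1 < ((pvPairs tm sc).count (c, p) : Int)
          then st.insert c (((pvPairs tm sc).count (c, p) : Int), p) else st) = _
    rw [show ((pvPairs tm sc).count (c, p)) = ((pvOcc tm sc c).count p) from pv_count_pair c p _]
  rw [PySem.List.foldl_congr_mem _ _ _ _ (fun st p _ => hcong st p)]
  rw [pv_run_max c (fun p => ((pvOcc tm sc c).count p : Int)) _ _ none (by simp) ?hpos]
  case hpos =>
    intro p hp
    have hmem : p ∈ pvOcc tm sc c := (PySem.Set.mem_ofList _ _).mp hp
    have hcnt := List.count_pos_iff.mpr hmem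
    show (0 : Int) < ((pvOcc tm sc c).count p : Int)
    exact_mod_cast hcnt
  congr 1
  rw [pvG, PySem.List.max?]
  apply PySem.List.foldl_congr_mem
  intro acc x _
  cases acc <;> rfl

lemma pv_stepW_eq (tm : List (List (Int × List (List String)))) (sc : Int)
    (win : PySem.Dict Int String) (k : Int) :
    (if 0 < (PySem.Dict.counter (pvOcc tm sc k)).size then
        match PySem.List.max? (PySem.Dict.counter (pvOcc tm sc k)).keys
            (fun x => (PySem.Dict.counter (pvOcc tm sc k)).getD x 0) with
        | some m => win.insert k m
        | none => win
      else win)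
    = match pvG tm sc k with | some m => win.insert k m | none => win := by
  have hkey : (fun x => (PySem.Dict.counter (pvOcc tm sc k)).getD x 0)
      = fun x => (((pvOcc tm sc k).count x : Int)) := funext (PySem.Dict.getD_counter _)
  rw [PySem.Dict.keys_counter, hkey]
  cases hm : pvG tm sc k with
  | none =>
    have hnil : PySem.Set.ofList (pvOcc tm sc k) = [] :=
      (PySem.List.max?_eq_none_iff _ _).mp hm
    rw [show PySem.List.max? (PySem.Set.ofList (pvOcc tm sc k))
          (fun x => (((pvOcc tm sc k).count x : Int))) = pvG tm sc k from rfl, hm]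
    have hsz : (PySem.Dict.counter (pvOcc tm sc k)).size = 0 := by
      simp [PySem.Dict.size, PySem.Dict.items_counter, hnil]
    simp [hsz]
  | some m =>
    rw [show PySem.List.max? (PySem.Set.ofList (pvOcc tm sc k))
          (fun x => (((pvOcc tm sc k).count x : Int))) = pvG tm sc k from rfl, hm]
    have hm' : PySem.List.max? (PySem.Set.ofList (pvOcc tm sc k))
        (fun p => (((pvOcc tm sc k).count p : Int))) = some m := hm
    have hmem : m ∈ PySem.Set.ofList (pvOcc tm sc k) := PySem.List.max?_mem hm'
    have hsz : 0 < (PySem.Dict.counter (pvOcc tm sc k)).size := by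
      rw [PySem.Dict.size, PySem.Dict.items_counter]
      simp only [List.length_map]
      exact List.length_pos_of_mem hmem
    simp [hsz]

-- ===== VERDICT (by name: the statement is the Claim_ definition above) =====
theorem predicate_phase2_spec : Claim_equal_predicate_phase2 := by
  intro tm sc _ _
  show predicate_phase2 tm sc = predicate_phase2_alt tm sc
  simp only [predicate_phase2, predicate_phase2_alt]
  rw [pv_foldA_flatten, pv_pairs_eq, ← pv_colOrder_eq]
  have hkeys : ((pvEvents tm sc).foldl pvStepA PySem.Dict.empty).keys
      = PySem.Set.ofList ((pvEvents tm sc).map (·.1)) := by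
    rw [pv_foldA_keys, PySem.Set.ofList_eq_foldl]
    rfl
  have hnd : ((pvEvents tm sc).foldl pvStepA PySem.Dict.empty).keys.Nodup :=
    hkeys ▸ PySem.Set.nodup_ofList _
  rw [PySem.Dict.items_eq_map_keys _ hnd [], hkeys, List.foldl_map]
  have hgetD : ∀ c, ((pvEvents tm sc).foldl pvStepA PySem.Dict.empty).getD c [] = pvOcc tm sc c := by
    intro c
    rw [pv_foldA_getD]
    simp [pvOcc, pvPairs]
  -- A's reporting fold is the conditional winner-insert fold
  have hstepA : ∀ (win : PySem.Dict Int String), ∀ k ∈ PySem.Set.ofList ((pvEvents tm sc).map (·.1)),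
      (fun (win : PySem.Dict Int String) (k : Int) =>
        let freq : PySem.Dict String Int :=
          PySem.Dict.counter (((pvEvents tm sc).foldl pvStepA PySem.Dict.empty).getD k []);
        if 0 < freq.size then
          match PySem.List.max? freq.keys (fun x => freq.getD x 0) with
          | some m => win.insert k m
          | none => win
        else win) win k
      = match pvG tm sc k with | some m => win.insert k m | none => win := by
    intro win k _
    simp only [hgetD k]
    exact pv_stepW_eq tm sc win k
  rw [PySem.List.foldl_congr_mem _ _ _ _ hstepA]
  -- B's reporting fold is the same conditional winner-insert fold
  have hstepB : ∀ (out : PySem.Dict Int String), ∀ c ∈ PySem.Set.ofList ((pvEvents tm sc).map (·.1)),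
      (fun (out : PySem.Dict Int String) (c : Int) =>
        match ((PySem.Dict.counter (pvPairs tm sc)).items.foldl (fun best q =>
            if (best.getD q.1.1 (0, "")).1 < q.2 then best.insert q.1.1 (q.2, q.1.2) else best)
            PySem.Dict.empty).get? c with
        | some cp => out.insert c cp.2
        | none => out) out c
      = match pvG tm sc c with | some m => out.insert c m | none => out := by
    intro out c _
    simp only []
    rw [show (fun (best : PySem.Dict Int (Int × String)) (q : (Int × String) × Int) =>
          if (best.getD q.1.1 (0, "")).1 < q.2 then best.insert q.1.1 (q.2, q.1.2) else best)
        = pvStepB from rfl]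
    rw [pv_best_get tm sc c]
    cases pvG tm sc c <;> rfl
  rw [PySem.List.foldl_congr_mem _ _ _ _ hstepB]
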